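-- pv_equiv track=rewrite | github.com/ByPineda/KNN-HEOM | kmeans.py | promedio_atributo_categorico
-- ===== SOURCE A (Python) =====
-- def promedio_atributo_categorico(categorias):
--     moda_categoria = {}
--     for categoria in categorias:
--         valor_categoria = categoria
--         if valor_categoria in moda_categoria:
--             moda_categoria[valor_categoria] += 1
--         else:
--             moda_categoria[valor_categoria] = 1
--     moda = sorted(moda_categoria.items(), key=lambda x: x[1], reverse=True)
--     return moda[0][0]
-- ===== SOURCE B (Python) =====
-- def promedio_atributo_categorico(categorias):
--     mejor = categorias[0]
--     mejor_cuenta = 0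
--     for categoria in categorias:
--         cuenta = categorias.count(categoria)
--         if cuenta > mejor_cuenta:
--             mejor = categoria
--             mejor_cuenta = cuenta
--     return mejor
-- ===== Notes on version B (the rewrite author's own statement) =====
-- stated objective: simpler
-- what changed: Replaced the frequency dict plus stable reverse-sort with a single scan that keeps the first category whose occurrence count strictly exceeds the best so far (recomputed with list.count), matching A's first-occurrence tie-break with no table and no sort.
import Mathlib
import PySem

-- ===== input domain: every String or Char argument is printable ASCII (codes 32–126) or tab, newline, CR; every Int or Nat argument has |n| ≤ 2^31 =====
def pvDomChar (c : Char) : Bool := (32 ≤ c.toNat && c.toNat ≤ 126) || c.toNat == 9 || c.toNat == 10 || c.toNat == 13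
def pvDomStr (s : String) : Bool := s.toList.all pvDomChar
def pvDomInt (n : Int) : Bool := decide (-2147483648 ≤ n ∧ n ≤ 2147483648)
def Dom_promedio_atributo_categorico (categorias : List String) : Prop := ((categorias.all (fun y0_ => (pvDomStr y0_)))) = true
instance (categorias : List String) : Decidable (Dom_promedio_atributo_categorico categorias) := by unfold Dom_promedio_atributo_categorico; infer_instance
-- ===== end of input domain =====

-- B replaces A's frequency dict + stable reverse sort with a single scan keeping the
-- first category whose count strictly exceeds the best so far (simpler: no table, no sort).

-- ===== PORT A =====
def promedio_atributo_categorico (categorias : List String) : String :=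
  -- moda_categoria = {}; for categoria in categorias: count it
  let moda_categoria : PySem.Dict String Int :=
    categorias.foldl (fun d categoria =>
      if d.contains categoria then d.insert categoria (d.getD categoria 0 + 1)
      else d.insert categoria 1) PySem.Dict.empty
  -- moda = sorted(moda_categoria.items(), key=lambda x: x[1], reverse=True)
  let moda := PySem.List.sorted moda_categoria.items (fun x => x.2) true
  -- return moda[0][0]  (IndexError on empty input: excluded by Pre_)
  match PySem.List.pyGet? moda 0 with
  | some p => p.1
  | none => ""

-- ===== PORT B =====
def promedio_atributo_categorico_alt (categorias : List String) : String :=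
  -- mejor = categorias[0]  (IndexError on empty input: excluded by Pre_)
  match PySem.List.pyGet? categorias 0 with
  | none => ""
  | some mejor0 =>
    (categorias.foldl (fun (st : String × Int) categoria =>
        let cuenta : Int := (PySem.List.count categorias categoria : Int)
        if st.2 < cuenta then (categoria, cuenta) else st) (mejor0, 0)).1

-- ===== PRECONDITION & SPEC =====
-- Pre_ excludes only the empty list, on which both Pythons raise IndexError.
def Pre_promedio_atributo_categorico (categorias : List String) : Prop := categorias ≠ []
instance (categorias : List String) : Decidable (Pre_promedio_atributo_categorico categorias) := by
  unfold Pre_promedio_atributo_categorico; infer_instance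
def pvWitness_promedio_atributo_categorico : List String := ["a", "b", "a"]

def Spec_promedio_atributo_categorico (categorias : List String) (out : String) : Prop :=
  out = promedio_atributo_categorico_alt categorias
instance (categorias : List String) (out : String) : Decidable (Spec_promedio_atributo_categorico categorias out) := by
  unfold Spec_promedio_atributo_categorico; infer_instance

-- ===== CLAIM (what is proved, stated in full; the proofs are below) =====
def Claim_equal_promedio_atributo_categorico : Prop := ∀ (categorias : List String), Dom_promedio_atributo_categorico categorias → Pre_promedio_atributo_categorico categorias → Spec_promedio_atributo_categorico categorias (promedio_atributo_categorico categorias)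

-- ===== LEMMAS AND PROOFS =====

-- first-max step over strings, relative to a fixed count function
def pvStepK (cnt : String → Int) (m k : String) : String := if cnt m < cnt k then k else m

-- ordered dedup relative to an accumulator of already-seen elements
def pvDed (l seen : List String) : List String :=
  match l with
  | [] => []
  | k :: l' => if seen.contains k then pvDed l' seen else k :: pvDed l' (k :: seen)

theorem pvDed_congr (l : List String) : ∀ s1 s2, (∀ k, k ∈ s1 ↔ k ∈ s2) → pvDed l s1 = pvDed l s2 := by
  induction l with
  | nil => intro _ _ _; rfl
  | cons k l' ih =>
    intro s1 s2 h
    simp only [pvDed, List.contains_eq_mem, decide_eq_true_eq]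
    by_cases hk : k ∈ s1
    · rw [if_pos (by simpa using hk), if_pos (by simpa [← h k] using hk)]
      exact ih s1 s2 h
    · rw [if_neg (by simpa using hk), if_neg (by simpa [← h k] using hk)]
      refine congrArg _ (ih _ _ ?_)
      intro j; simp [h j]

theorem pvOfList_eq (l : List String) : ∀ s : List String,
    l.foldl PySem.Set.add s = s ++ pvDed l s := by
  induction l with
  | nil => intro s; simp [pvDed]
  | cons k l' ih =>
    intro s
    simp only [List.foldl_cons, pvDed]
    by_cases hk : k ∈ s
    · rw [PySem.Set.add_of_mem hk, if_pos (by simpa using hk)]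
      exact ih s
    · rw [PySem.Set.add_of_not_mem hk, if_neg (by simpa using hk), ih (s ++ [k])]
      rw [pvDed_congr l' (s ++ [k]) (k :: s) (by intro j; simp; tauto)]
      simp

theorem pvStepK_le_left (cnt : String → Int) (m k : String) : cnt m ≤ cnt (pvStepK cnt m k) := by
  unfold pvStepK; split_ifs with h <;> omega

theorem pvStepK_le_right (cnt : String → Int) (m k : String) : cnt k ≤ cnt (pvStepK cnt m k) := by
  unfold pvStepK; split_ifs with h <;> omega

-- folding the first-max step ignores elements already seen with count ≤ current best
theorem pvDed_fold (cnt : String → Int) (l : List String) : ∀ (seen : List String) (m : String),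
    (∀ k ∈ seen, cnt k ≤ cnt m) →
    l.foldl (pvStepK cnt) m = (pvDed l seen).foldl (pvStepK cnt) m := by
  induction l with
  | nil => intro _ _ _; rfl
  | cons k l' ih =>
    intro seen m hseen
    simp only [List.foldl_cons, pvDed]
    by_cases hk : k ∈ seen
    · rw [if_pos (by simpa using hk)]
      have : pvStepK cnt m k = m := by
        unfold pvStepK; rw [if_neg (by have := hseen k hk; omega)]
      rw [this]; exact ih seen m hseen
    · rw [if_neg (by simpa using hk)]
      simp only [List.foldl_cons]
      refine ih (k :: seen) (pvStepK cnt m k) ?_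
      intro j hj
      rcases List.mem_cons.mp hj with rfl | hj
      · exact pvStepK_le_right cnt m j
      · exact le_trans (hseen j hj) (pvStepK_le_left cnt m k)

-- the head of the descending stable insertion sort is the first-max fold
theorem pvHead_insertBy (l : List (String × Int)) : ∀ (m : String × Int) (t : List (String × Int)),
    ∃ t', l.foldl (fun acc x =>
        PySem.List.insertBy (fun a b => decide ((fun x : String × Int => x.2) b < (fun x : String × Int => x.2) a)) x acc) (m :: t)
      = (l.foldl (fun m x => if m.2 < x.2 then x else m) m) :: t' := by
  induction l with
  | nil => intro m t; exact ⟨t, rfl⟩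
  | cons x l' ih =>
    intro m t
    simp only [List.foldl_cons]
    by_cases h : m.2 < x.2
    · have : PySem.List.insertBy (fun a b => decide ((fun x : String × Int => x.2) b < (fun x : String × Int => x.2) a)) x (m :: t)
          = x :: m :: t := by
        simp [PySem.List.insertBy, h]
      rw [this, if_pos h]; exact ih x (m :: t)
    · have : PySem.List.insertBy (fun a b => decide ((fun x : String × Int => x.2) b < (fun x : String × Int => x.2) a)) x (m :: t)
          = m :: PySem.List.insertBy (fun a b => decide ((fun x : String × Int => x.2) b < (fun x : String × Int => x.2) a)) x t := by
        simp [PySem.List.insertBy, h]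
      rw [this, if_neg h]; exact ih m _
  
-- folding the pair step over the (k, cnt k) image is the string fold
theorem pvMap_fold (cnt : String → Int) (L : List String) : ∀ m : String,
    (L.map (fun k => (k, cnt k))).foldl (fun m x => if m.2 < x.2 then x else m) (m, cnt m)
      = (L.foldl (pvStepK cnt) m, cnt (L.foldl (pvStepK cnt) m)) := by
  induction L with
  | nil => intro m; rfl
  | cons k L' ih =>
    intro m
    simp only [List.map_cons, List.foldl_cons]
    by_cases h : cnt m < cnt k
    · have h2 : pvStepK cnt m k = k := by unfold pvStepK; rw [if_pos h]
      rw [if_pos h, h2]; exact ih k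
    · have h2 : pvStepK cnt m k = m := by unfold pvStepK; rw [if_neg h]
      rw [if_neg h, h2]; exact ih m

-- folding B's pair step (which carries the count) is the string fold
theorem pvPair_fold (cnt : String → Int) (L : List String) : ∀ m : String,
    L.foldl (fun (st : String × Int) k => if st.2 < cnt k then (k, cnt k) else st) (m, cnt m)
      = (L.foldl (pvStepK cnt) m, cnt (L.foldl (pvStepK cnt) m)) := by
  induction L with
  | nil => intro m; rfl
  | cons k L' ih =>
    intro m
    simp only [List.foldl_cons]
    by_cases h : cnt m < cnt k
    · have h2 : pvStepK cnt m k = k := by unfold pvStepK; rw [if_pos h]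
      rw [if_pos h, h2]; exact ih k
    · have h2 : pvStepK cnt m k = m := by unfold pvStepK; rw [if_neg h]
      rw [if_neg h, h2]; exact ih m

-- A's counting loop is the Counter
theorem pvA_dict (xs : List String) :
    xs.foldl (fun d categoria =>
      if d.contains categoria then d.insert categoria (d.getD categoria 0 + 1)
      else d.insert categoria 1) PySem.Dict.empty = PySem.Dict.counter xs := by
  rw [← PySem.Dict.foldl_insert_getD_add_one_eq_counter]
  have hf : (fun (d : PySem.Dict String Int) categoria =>
      if d.contains categoria then d.insert categoria (d.getD categoria 0 + 1)
      else d.insert categoria 1)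
      = (fun (d : PySem.Dict String Int) x => d.insert x (d.getD x 0 + 1)) := by
    funext d x
    by_cases h : d.contains x
    · rw [if_pos h]
    · rw [if_neg h, PySem.Dict.getD_of_not_contains d (0 : Int) (by simpa using h)]
      norm_num
  rw [hf]

-- ===== VERDICT (by name: the statement is the Claim_ definition above) =====
theorem promedio_atributo_categorico_spec : Claim_equal_promedio_atributo_categorico := by
  intro categorias _ hpre
  unfold Spec_promedio_atributo_categorico
  obtain ⟨x0, rest, rfl⟩ : ∃ x0 rest, categorias = x0 :: rest := by
    cases categorias with
    | nil => exact absurd rfl hpre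
    | cons a b => exact ⟨a, b, rfl⟩
  set cnt : String → Int := fun k => ((PySem.List.count (x0 :: rest) k : Nat) : Int) with hcnt
  have hget : PySem.List.pyGet? (x0 :: rest) (0 : Int) = some x0 := by
    simp [PySem.List.pyGet?, PySem.List.pyIdx?]
  have hcx0 : (0 : Int) < cnt x0 := by
    simp only [hcnt, PySem.List.count_eq]
    have h1 : 0 < List.count x0 (x0 :: rest) := by
      have := List.count_cons_self (a := x0) (l := rest)
      omega
    exact_mod_cast h1
  -- B side
  have hB : promedio_atributo_categorico_alt (x0 :: rest) = rest.foldl (pvStepK cnt) x0 := by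
    unfold promedio_atributo_categorico_alt
    rw [hget]
    show (List.foldl (fun (st : String × Int) k => if st.2 < cnt k then (k, cnt k) else st)
        (x0, 0) (x0 :: rest)).1 = _
    rw [List.foldl_cons]
    show (List.foldl (fun (st : String × Int) k => if st.2 < cnt k then (k, cnt k) else st)
        (if (0 : Int) < cnt x0 then (x0, cnt x0) else (x0, 0)) rest).1 = _
    rw [if_pos hcx0, pvPair_fold cnt rest x0]
  -- A side
  have hA : promedio_atributo_categorico (x0 :: rest) = (pvDed rest [x0]).foldl (pvStepK cnt) x0 := by
    have hS : PySem.Set.ofList (x0 :: rest) = x0 :: pvDed rest [x0] := by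
      rw [PySem.Set.ofList_eq_foldl]
      simp only [List.foldl_cons]
      have hadd : PySem.Set.add ([] : List String) x0 = [x0] := by
        rw [PySem.Set.add_of_not_mem (by simp)]; rfl
      rw [hadd, pvOfList_eq rest [x0]]
      simp
    have hmapfn : (fun k : String => (k, ((List.count k (x0 :: rest) : Nat) : Int)))
        = (fun k => (k, cnt k)) := by
      funext k
      simp [hcnt, PySem.List.count_eq]
    simp only [promedio_atributo_categorico]
    rw [pvA_dict, PySem.Dict.items_counter, hmapfn, hS, List.map_cons,
      PySem.List.sorted_rev_eq_foldl_insertBy, List.foldl_cons]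
    have hins : PySem.List.insertBy (fun a b => decide ((fun x : String × Int => x.2) b < (fun x : String × Int => x.2) a)) (x0, cnt x0) ([] : List (String × Int)) = [(x0, cnt x0)] := by
      simp [PySem.List.insertBy]
    rw [hins]
    obtain ⟨t', ht'⟩ := pvHead_insertBy ((pvDed rest [x0]).map (fun k => (k, cnt k))) (x0, cnt x0) []
    rw [ht', pvMap_fold cnt (pvDed rest [x0]) x0]
    simp [PySem.List.pyGet?, PySem.List.pyIdx?]
  rw [hA, hB]
  exact (pvDed_fold cnt rest [x0] x0 (by intro k hk; simp at hk; subst hk; exact le_refl _)).symm
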